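-- pv_equiv track=rewrite | github.com/phc2017002/Autonomous_Driving_1 | visual_grounding_for_MMAU.py | determine_question_type
-- ===== SOURCE A (Python) =====
-- def determine_question_type(caption_text):
--     """
--     Determine if the caption is interrogative or declarative
--     """
--     interrogative_keywords = ['what', 'where', 'when', 'who', 'which', 'how', 'why', 'is', 'are', 'can', 'does', 'do', '?']
--
--     caption_lower = caption_text.lower().strip()
--
--     # Check for question mark
--     if '?' in caption_text:
--         return "interrogative"
--
--     # Check if starts with interrogative word
--     for keyword in interrogative_keywords:
--         if caption_lower.startswith(keyword + ' '):
--             return "interrogative"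
--
--     return "declarative"
-- ===== SOURCE B (Python) =====
-- # B: one left-to-right walk of the lowered/stripped caption through a hand-built
-- # prefix trie of the interrogative openers (each keyword followed by a space);
-- # the '?' containment check on the original text stays first.
-- # True marks "a full keyword plus trailing space has just been consumed".
-- _TRIE = {
--     'w': {'h': {
--         'a': {'t': {' ': True}},
--         'e': {'r': {'e': {' ': True}}, 'n': {' ': True}},
--         'o': {' ': True},
--         'i': {'c': {'h': {' ': True}}},
--         'y': {' ': True},
--     }},
--     'h': {'o': {'w': {' ': True}}},
--     'i': {'s': {' ': True}},
--     'a': {'r': {'e': {' ': True}}},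
--     'c': {'a': {'n': {' ': True}}},
--     'd': {'o': {' ': True, 'e': {'s': {' ': True}}}},
-- }
--
-- def determine_question_type(caption_text):
--     if '?' in caption_text:
--         return "interrogative"
--     node = _TRIE
--     for ch in caption_text.lower().strip():
--         nxt = node.get(ch)
--         if nxt is None:
--             return "declarative"
--         if nxt is True:
--             return "interrogative"
--         node = nxt
--     return "declarative"
-- ===== Notes on version B (the rewrite author's own statement) =====
-- stated objective: alternative
-- what changed: Replaces A's loop of 13 space-suffixed startswith prefix tests with a single left-to-right walk of the caption through a hand-built character trie of the interrogative openers, deciding in one pass over at most six characters; the question-mark check on the original text stays first.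
import Mathlib
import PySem

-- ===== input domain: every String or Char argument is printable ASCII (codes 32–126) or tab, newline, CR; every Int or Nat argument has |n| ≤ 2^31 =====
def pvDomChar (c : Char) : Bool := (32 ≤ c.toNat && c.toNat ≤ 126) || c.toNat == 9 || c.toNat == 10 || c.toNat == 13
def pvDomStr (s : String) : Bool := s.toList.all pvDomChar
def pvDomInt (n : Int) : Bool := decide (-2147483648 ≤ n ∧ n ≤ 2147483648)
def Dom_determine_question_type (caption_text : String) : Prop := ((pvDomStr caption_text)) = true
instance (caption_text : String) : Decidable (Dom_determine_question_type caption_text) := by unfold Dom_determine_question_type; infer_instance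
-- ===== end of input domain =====

-- B replaces A's 13 space-suffixed startswith tests by one walk of the lowered/stripped
-- caption through a hand-built character trie of the interrogative openers (alternative; same cost).

-- ===== PORT A =====
def dqtKeywords : List String :=
  ["what", "where", "when", "who", "which", "how", "why", "is", "are", "can", "does", "do", "?"]

def determine_question_type (caption_text : String) : String :=
  let caption_lower := PySem.Str.lower (PySem.Str.strip caption_text)
  if PySem.Str.isIn "?" caption_text then "interrogative"
  else if dqtKeywords.any (fun keyword => PySem.Str.startswith caption_lower (keyword ++ " ")) then
    "interrogative"
  else "declarative"

-- ===== PORT B =====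
-- Source B's nested-dict trie, ported by hand in first-child/next-sibling form:
-- `node c term child sib` is the dict entry for key c (term = "value is True"),
-- `sib` the remaining entries of the same dict, `child` the value dict.
inductive PTrie where
  | empty : PTrie
  | node : Char → Bool → PTrie → PTrie → PTrie
deriving DecidableEq, Repr

-- the `for ch in …` loop of Source B: look ch up in the current dict (scan the sibling
-- chain); missing key → "declarative" (false), value True → "interrogative" (true),
-- otherwise continue in the child dict with the rest of the characters.
def ptrieRun : PTrie → List Char → Bool
  | _, [] => false
  | .empty, _ :: _ => false
  | .node ch term child sib, c :: r =>
      if ch = c then (term || ptrieRun child r)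
      else ptrieRun sib (c :: r)

-- the literal _TRIE of Source B, entries in the same order
def pvTrie : PTrie :=
  .node 'w' false
    (.node 'h' false
      (.node 'a' false (.node 't' false (.node ' ' true .empty .empty) .empty)
        (.node 'e' false
          (.node 'r' false (.node 'e' false (.node ' ' true .empty .empty) .empty)
            (.node 'n' false (.node ' ' true .empty .empty) .empty))
          (.node 'o' false (.node ' ' true .empty .empty)
            (.node 'i' false (.node 'c' false (.node 'h' false (.node ' ' true .empty .empty) .empty) .empty)
              (.node 'y' false (.node ' ' true .empty .empty) .empty)))))
      .empty)
    (.node 'h' false (.node 'o' false (.node 'w' false (.node ' ' true .empty .empty) .empty) .empty)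
      (.node 'i' false (.node 's' false (.node ' ' true .empty .empty) .empty)
        (.node 'a' false (.node 'r' false (.node 'e' false (.node ' ' true .empty .empty) .empty) .empty)
          (.node 'c' false (.node 'a' false (.node 'n' false (.node ' ' true .empty .empty) .empty) .empty)
            (.node 'd' false
              (.node 'o' false
                (.node ' ' true .empty
                  (.node 'e' false (.node 's' false (.node ' ' true .empty .empty) .empty) .empty))
                .empty)
              .empty)))))

def determine_question_type_alt (caption_text : String) : String :=
  if PySem.Str.isIn "?" caption_text then "interrogative"
  else if ptrieRun pvTrie (PySem.Str.lower (PySem.Str.strip caption_text)).toList then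
    "interrogative"
  else "declarative"

-- ===== PRECONDITION & SPEC =====
def Spec_determine_question_type (caption_text : String) (out : String) : Prop := out = determine_question_type_alt caption_text
instance (caption_text : String) (out : String) : Decidable (Spec_determine_question_type caption_text out) := by unfold Spec_determine_question_type; infer_instance

-- ===== CLAIM (what is proved, stated in full; the proofs are below) =====
def Claim_equal_determine_question_type : Prop := ∀ (caption_text : String), Dom_determine_question_type caption_text → Spec_determine_question_type caption_text (determine_question_type caption_text)

-- ===== LEMMAS AND PROOFS =====

-- the set of words a trie accepts (keyword plus trailing space, as char lists)
def ptrieWords : PTrie → List (List Char)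
  | .empty => []
  | .node ch term child sib =>
      (if term then [[ch]] else (ptrieWords child).map (ch :: ·)) ++ ptrieWords sib

def ptrieKeys : PTrie → List Char
  | .empty => []
  | .node ch _ _ sib => ch :: ptrieKeys sib

-- well-formed: sibling keys distinct at every node (true of a Python dict)
def ptrieWf : PTrie → Bool
  | .empty => true
  | .node ch _ child sib => (!(ptrieKeys sib).contains ch) && ptrieWf child && ptrieWf sib

lemma ptrieWords_shape (t : PTrie) (w : List Char) (hw : w ∈ ptrieWords t) :
    ∃ c w', w = c :: w' ∧ c ∈ ptrieKeys t := by
  induction t with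
  | empty => simp [ptrieWords] at hw
  | node ch term child sib ihc ihs =>
    simp only [ptrieWords, List.mem_append] at hw
    rcases hw with h | h
    · split_ifs at h with ht
      · simp only [List.mem_singleton] at h
        exact ⟨ch, [], h, by simp [ptrieKeys]⟩
      · obtain ⟨w', _, rfl⟩ := List.mem_map.mp h
        exact ⟨ch, w', rfl, by simp [ptrieKeys]⟩
    · obtain ⟨c, w', rfl, hc⟩ := ihs h
      exact ⟨c, w', rfl, by simp [ptrieKeys, hc]⟩

lemma ptrieRun_iff (t : PTrie) (hwf : ptrieWf t = true) (l : List Char) :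
    ptrieRun t l = true ↔ ∃ w ∈ ptrieWords t, w.isPrefixOf l = true := by
  induction t generalizing l with
  | empty => cases l <;> simp [ptrieRun, ptrieWords]
  | node ch term child sib ihc ihs =>
    simp only [ptrieWf, Bool.and_eq_true, Bool.not_eq_true', List.contains_eq_mem,
      decide_eq_false_iff_not] at hwf
    obtain ⟨⟨hns, hwc⟩, hws⟩ := hwf
    cases l with
    | nil =>
      simp only [ptrieRun, Bool.false_eq_true, false_iff]
      rintro ⟨w, hw, hp⟩
      obtain ⟨c, w', rfl, _⟩ := ptrieWords_shape _ _ hw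
      simp [List.isPrefixOf] at hp
    | cons c r =>
      simp only [ptrieRun, ptrieWords, List.mem_append]
      by_cases hch : ch = c
      · subst hch
        rw [if_pos rfl]
        cases term with
        | true =>
          simp only [Bool.true_or, if_pos, true_iff]
          exact ⟨[ch], by simp, by simp [List.isPrefixOf]⟩
        | false =>
          simp only [Bool.false_or, if_neg (by simp : ¬ (false = true))]
          rw [ihc hwc]
          constructor
          · rintro ⟨w', hw', hp⟩
            refine ⟨ch :: w', Or.inl ?_, by simp [List.isPrefixOf, hp]⟩
            exact List.mem_map.mpr ⟨w', hw', rfl⟩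
          · rintro ⟨w, hw, hp⟩
            rcases hw with hw | hw
            · simp only [List.mem_map] at hw
              obtain ⟨w', hw', rfl⟩ := hw
              simp only [List.isPrefixOf, BEq.rfl, Bool.true_and] at hp
              exact ⟨w', hw', hp⟩
            · obtain ⟨c', w', rfl, hc'⟩ := ptrieWords_shape _ _ hw
              simp only [List.isPrefixOf, Bool.and_eq_true, beq_iff_eq] at hp
              exact absurd (hp.1 ▸ hc') hns
      · rw [if_neg hch, ihs hws]
        constructor
        · rintro ⟨w, hw, hp⟩
          exact ⟨w, Or.inr hw, hp⟩
        · rintro ⟨w, hw, hp⟩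
          rcases hw with hw | hw
          · exfalso
            split_ifs at hw with ht
            · simp only [List.mem_singleton] at hw
              subst hw
              simp only [List.isPrefixOf, Bool.and_eq_true, beq_iff_eq] at hp
              exact hch hp.1
            · obtain ⟨w', _, rfl⟩ := List.mem_map.mp hw
              simp only [List.isPrefixOf, Bool.and_eq_true, beq_iff_eq] at hp
              exact hch hp.1
          · exact ⟨w, hw, hp⟩

lemma mem_of_mem_strip {c : Char} {l : List Char} (h : c ∈ PySem.Chars.strip l) : c ∈ l := by
  unfold PySem.Chars.strip PySem.Chars.rstrip PySem.Chars.lstrip at h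
  have h1 := List.mem_reverse.mp h
  have h2 := (List.dropWhile_sublist _).mem h1
  exact (List.dropWhile_sublist _).mem (List.mem_reverse.mp h2)

lemma lowerChar_eq_qmark {c : Char} (h : PySem.Chars.lowerChar c = '?') : c = '?' := by
  unfold PySem.Chars.lowerChar PySem.Chars.isupper at h
  split_ifs at h with hu
  · exfalso
    simp only [Bool.and_eq_true, decide_eq_true_eq, Char.le_def] at hu
    have h65 : 65 ≤ c.toNat := hu.1
    have h90 : c.toNat ≤ 90 := hu.2
    have h2 := congrArg Char.toNat h
    have hv : (c.toNat + 32).isValidChar := Or.inl (by omega)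
    rw [Char.toNat_ofNat, if_pos hv] at h2
    have h63 : ('?' : Char).toNat = 63 := rfl
    omega
  · exact h

lemma qmark_mem_of_mem_lower_strip {l : List Char}
    (h : '?' ∈ PySem.Chars.lower (PySem.Chars.strip l)) : '?' ∈ l := by
  unfold PySem.Chars.lower at h
  obtain ⟨c, hc, hlc⟩ := List.mem_map.mp h
  exact mem_of_mem_strip ((lowerChar_eq_qmark hlc) ▸ hc)

lemma scan_eq_trie_run (s : String)
    (hql : '?' ∉ (PySem.Str.lower (PySem.Str.strip s)).toList) :
    (dqtKeywords.any (fun keyword =>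
        PySem.Str.startswith (PySem.Str.lower (PySem.Str.strip s)) (keyword ++ " ")))
      = ptrieRun pvTrie (PySem.Str.lower (PySem.Str.strip s)).toList := by
  have hsw : ∀ k : String, PySem.Str.startswith (PySem.Str.lower (PySem.Str.strip s)) (k ++ " ")
      = ((k.toList ++ [' ']).isPrefixOf ((PySem.Str.lower (PySem.Str.strip s)).toList)) := by
    intro k
    simp [PySem.Str.startswith, PySem.Chars.startswith]
  revert hql
  generalize (PySem.Str.lower (PySem.Str.strip s)).toList = l at hsw ⊢
  intro hql
  rw [Bool.eq_iff_iff]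
  rw [ptrieRun_iff pvTrie (by decide) l]
  have hwords : ptrieWords pvTrie =
      [['w','h','a','t',' '], ['w','h','e','r','e',' '], ['w','h','e','n',' '],
       ['w','h','o',' '], ['w','h','i','c','h',' '], ['w','h','y',' '],
       ['h','o','w',' '], ['i','s',' '], ['a','r','e',' '], ['c','a','n',' '],
       ['d','o',' '], ['d','o','e','s',' ']] := by decide
  have hqatom : ¬ ((['?',' '] : List Char).isPrefixOf l = true) := by
    intro h
    exact hql ((List.isPrefixOf_iff_prefix.mp h).sublist.mem (by simp))
  simp only [dqtKeywords, List.any_cons, List.any_nil, Bool.or_eq_true, Bool.false_eq_true,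
    or_false, hsw, hwords, List.mem_cons, List.not_mem_nil, exists_eq_or_imp,
    exists_eq_left]
  have e1 : (("what" : String).toList ++ [' ']) = ['w','h','a','t',' '] := by decide
  have e2 : (("where" : String).toList ++ [' ']) = ['w','h','e','r','e',' '] := by decide
  have e3 : (("when" : String).toList ++ [' ']) = ['w','h','e','n',' '] := by decide
  have e4 : (("who" : String).toList ++ [' ']) = ['w','h','o',' '] := by decide
  have e5 : (("which" : String).toList ++ [' ']) = ['w','h','i','c','h',' '] := by decide
  have e6 : (("how" : String).toList ++ [' ']) = ['h','o','w',' '] := by decide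
  have e7 : (("why" : String).toList ++ [' ']) = ['w','h','y',' '] := by decide
  have e8 : (("is" : String).toList ++ [' ']) = ['i','s',' '] := by decide
  have e9 : (("are" : String).toList ++ [' ']) = ['a','r','e',' '] := by decide
  have e10 : (("can" : String).toList ++ [' ']) = ['c','a','n',' '] := by decide
  have e11 : (("does" : String).toList ++ [' ']) = ['d','o','e','s',' '] := by decide
  have e12 : (("do" : String).toList ++ [' ']) = ['d','o',' '] := by decide
  have e13 : (("?" : String).toList ++ [' ']) = ['?',' '] := by decide
  rw [e1, e2, e3, e4, e5, e6, e7, e8, e9, e10, e11, e12, e13]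
  tauto

-- ===== VERDICT (by name: the statement is the Claim_ definition above) =====
theorem determine_question_type_spec : Claim_equal_determine_question_type := by
  intro s _
  unfold Spec_determine_question_type determine_question_type determine_question_type_alt
  by_cases hq : PySem.Str.isIn "?" s = true
  · rw [if_pos hq, if_pos hq]
  · rw [if_neg hq, if_neg hq]
    have hq' : '?' ∉ s.toList := by
      intro hmem
      obtain ⟨p, r, hpr⟩ := List.mem_iff_append.mp hmem
      refine hq ((PySem.Str.isIn_iff_infix _ _).mpr ⟨p, r, ?_⟩)
      have h1 : ("?" : String).toList = ['?'] := rfl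
      rw [h1, hpr]
      simp
    have hql : '?' ∉ (PySem.Str.lower (PySem.Str.strip s)).toList := by
      rw [PySem.Str.toList_lower, PySem.Str.toList_strip]
      intro h
      exact hq' (qmark_mem_of_mem_lower_strip h)
    rw [scan_eq_trie_run s hql]
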